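-- pv_equiv track=rewrite | github.com/ShreyaN158/evil-twin-app | backend.py | analyze_networks
-- ===== SOURCE A (Python) =====
-- def analyze_networks(networks):
--     ssid_map = {}
--
--     for net in networks:
--         ssid_map.setdefault(net["ssid"], []).append(net)
--
--     result = []
--     for ssid, items in ssid_map.items():
--         status = "⚠ Suspicious" if len(items) > 1 else "Safe"
--         for item in items:
--             item["status"] = status
--             result.append(item)
--
--     return result
-- ===== SOURCE B (Python) =====
-- def analyze_networks(networks):
--     # Peel off one SSID-group at a time from the front of the remaining list:
--     # the group of the first remaining network is filtered out, tagged, and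
--     # emitted; repeat until nothing remains.  No SSID->bucket map is built.
--     result = []
--     remaining = list(networks)
--     while remaining:
--         s = remaining[0]["ssid"]
--         group = [n for n in remaining if n["ssid"] == s]
--         remaining = [n for n in remaining if n["ssid"] != s]
--         status = "⚠ Suspicious" if len(group) > 1 else "Safe"
--         for item in group:
--             item["status"] = status
--             result.append(item)
--     return result
-- ===== Notes on version B (the rewrite author's own statement) =====
-- stated objective: alternative
-- what changed: Replaces A's single-pass dict-of-buckets grouping (setdefault+append, then walk the dict) with a map-free group-peeling loop: repeatedly take the first remaining network's SSID, split the remaining list into that SSID's group (emitted, tagged) and the rest, until empty.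
import Mathlib
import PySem

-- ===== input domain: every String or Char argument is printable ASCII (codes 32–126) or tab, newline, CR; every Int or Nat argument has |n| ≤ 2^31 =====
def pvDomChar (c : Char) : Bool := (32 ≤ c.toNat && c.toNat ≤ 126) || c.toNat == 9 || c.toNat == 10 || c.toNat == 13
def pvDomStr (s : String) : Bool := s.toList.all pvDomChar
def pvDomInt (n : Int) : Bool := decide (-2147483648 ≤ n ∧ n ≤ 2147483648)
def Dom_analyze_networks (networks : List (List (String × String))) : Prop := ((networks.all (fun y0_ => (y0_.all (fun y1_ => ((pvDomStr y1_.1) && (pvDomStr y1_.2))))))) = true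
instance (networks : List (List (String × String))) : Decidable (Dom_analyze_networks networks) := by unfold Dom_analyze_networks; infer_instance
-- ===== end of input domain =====

-- B replaces A's dict-of-buckets grouping by a map-free group-peeling loop (split off the
-- first remaining SSID's group, tag, emit, repeat); alternative decomposition, same return
-- value; both Pythons also set item["status"] in place — equivalence is about the return value.


-- net["ssid"]  (Pre_ guarantees the key is present, so the default is never read)
def pvSsid (net : List (String × String)) : String :=
  (PySem.Dict.mk net).getD "ssid" ""

-- item["status"] = status  (overwrite in place, new key appends)
def pvSetStatus (net : List (String × String)) (status : String) : List (String × String) :=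
  ((PySem.Dict.mk net).insert "status" status).items

-- ===== PORT A =====
def analyze_networks (networks : List (List (String × String))) : List (List (String × String)) :=
  -- for net in networks: ssid_map.setdefault(net["ssid"], []).append(net)
  let ssid_map : PySem.Dict String (List (List (String × String))) :=
    networks.foldl (fun d net => d.modify (pvSsid net) [] (fun l => l ++ [net])) PySem.Dict.empty
  -- for ssid, items in ssid_map.items(): …
  ssid_map.items.foldl (fun result p =>
    let status := if p.2.length > 1 then "⚠ Suspicious" else "Safe"
    p.2.foldl (fun r item => r ++ [pvSetStatus item status]) result) []

-- ===== PORT B =====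
-- the 'while remaining:' loop of Source B, as recursion on the remaining list:
-- s = remaining[0]["ssid"]; group = [n if ssid==s]; remaining = [n if ssid!=s];
-- for item in group: item["status"] = status; result.append(item)
def pvPeel (remaining result : List (List (String × String))) : List (List (String × String)) :=
  match remaining with
  | [] => result
  | net :: t =>
    pvPeel ((net :: t).filter (fun n => pvSsid n != pvSsid net))
      (((net :: t).filter (fun n => pvSsid n == pvSsid net)).foldl
        (fun r item => r ++ [pvSetStatus item
          (if ((net :: t).filter (fun n => pvSsid n == pvSsid net)).length > 1
           then "⚠ Suspicious" else "Safe")]) result)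
termination_by remaining.length
decreasing_by
  simp only [List.filter_cons, bne_self_eq_false, Bool.false_eq_true, if_false, List.length_cons]
  exact Nat.lt_succ_of_le (List.length_filter_le _ _)

def analyze_networks_alt (networks : List (List (String × String))) : List (List (String × String)) :=
  pvPeel networks []

-- ===== PRECONDITION & SPEC =====
-- Pre_ excludes networks in which some entry lacks the "ssid" key: Python A raises KeyError there.
def Pre_analyze_networks (networks : List (List (String × String))) : Prop :=
  ∀ net ∈ networks, (PySem.Dict.mk net).contains "ssid" = true
instance (networks : List (List (String × String))) : Decidable (Pre_analyze_networks networks) := by unfold Pre_analyze_networks; infer_instance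

def pvWitness_analyze_networks : (List (List (String × String))) :=
  [[("ssid", "home"), ("bssid", "aa")], [("ssid", "home")], [("ssid", "cafe")]]

def Spec_analyze_networks (networks : List (List (String × String))) (out : List (List (String × String))) : Prop := out = analyze_networks_alt networks
instance (networks : List (List (String × String))) (out : List (List (String × String))) : Decidable (Spec_analyze_networks networks out) := by unfold Spec_analyze_networks; infer_instance

-- ===== CLAIM (what is proved, stated in full; the proofs are below) =====
def Claim_equal_analyze_networks : Prop := ∀ (networks : List (List (String × String))), Dom_analyze_networks networks → Pre_analyze_networks networks → Spec_analyze_networks networks (analyze_networks networks)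

-- ===== LEMMAS AND PROOFS =====

-- the SSID-group of l for key c, tagged with its status
def pvTagGroup (l : List (List (String × String))) (c : String) : List (List (String × String)) :=
  (l.filter (fun n => pvSsid n == c)).map
    (fun item => pvSetStatus item
      (if (l.filter (fun n => pvSsid n == c)).length > 1 then "⚠ Suspicious" else "Safe"))

-- A's bucket for key c is exactly the filtered group.
theorem pv_group_eq (networks : List (List (String × String))) (c : String) :
    (networks.foldl (fun d net => d.modify (pvSsid net) [] (fun l => l ++ [net]))
      (PySem.Dict.empty : PySem.Dict String (List (List (String × String))))).getD c []
      = networks.filter (fun net => pvSsid net == c) := by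
  have h : networks.foldl (fun d net => d.modify (pvSsid net) [] (fun l => l ++ [net]))
      (PySem.Dict.empty : PySem.Dict String (List (List (String × String))))
      = (networks.map (fun n => (pvSsid n, n))).foldl
          (fun d p => d.modify p.1 [] (fun l => l ++ [p.2])) PySem.Dict.empty := by
    rw [List.foldl_map]
  rw [h, PySem.Dict.getD_foldl_modify_append]
  simp [List.filter_map, Function.comp_def]

-- A equals: flatMap of the tagged groups over the distinct SSIDs in first-appearance order.
theorem pv_A_eq (l : List (List (String × String))) :
    analyze_networks l = (PySem.Set.ofList (l.map pvSsid)).flatMap (pvTagGroup l) := by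
  unfold analyze_networks
  set d := l.foldl (fun d net => d.modify (pvSsid net) [] (fun l => l ++ [net]))
    (PySem.Dict.empty : PySem.Dict String (List (List (String × String)))) with hd
  have hnd : d.keys.Nodup := by
    rw [hd]
    exact PySem.Dict.nodup_keys_foldl_modify_key l pvSsid [] (fun d x => fun l => l ++ [x]) _
      PySem.Dict.nodup_keys_empty
  have hkeys : d.keys = PySem.Set.ofList (l.map pvSsid) := by
    rw [hd, PySem.Dict.keys_foldl_modify_key]
    rfl
  dsimp only
  rw [PySem.Dict.items_eq_map_keys d hnd [], List.foldl_map, hkeys]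
  calc (PySem.Set.ofList (l.map pvSsid)).foldl (fun result k =>
          let status := if (d.getD k []).length > 1 then "⚠ Suspicious" else "Safe";
          (d.getD k []).foldl (fun r item => r ++ [pvSetStatus item status]) result) []
      = (PySem.Set.ofList (l.map pvSsid)).foldl (fun result k => result ++ pvTagGroup l k) [] := by
        apply PySem.List.foldl_congr_mem
        intro acc k _
        dsimp only
        rw [PySem.List.foldl_append_singleton_eq_map, hd, pv_group_eq, pvTagGroup]
    _ = (PySem.Set.ofList (l.map pvSsid)).flatMap (pvTagGroup l) := by
        rw [PySem.List.foldl_append_eq_flatMap]; rfl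

-- keeping x in the accumulator commutes with consing it, when x never reappears
theorem pv_foldl_add_cons {x : String} {ys : List String} (hx : x ∉ ys) (s : List String) :
    ys.foldl PySem.Set.add (x :: s) = x :: ys.foldl PySem.Set.add s := by
  induction ys generalizing s with
  | nil => rfl
  | cons y t ih =>
    have hyx : (y == x) = false := by
      simp only [beq_eq_false_iff_ne]; intro h; exact hx (h ▸ List.mem_cons_self)
    have hmem : x ∉ t := fun h => hx (List.mem_cons_of_mem _ h)
    simp only [List.foldl_cons, PySem.Set.add, PySem.Set.contains, List.contains_cons, hyx,
      Bool.false_or]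
    by_cases hc : s.contains y
    · simp only [hc, if_true]; exact ih hmem _
    · simp only [hc, Bool.false_eq_true, if_false]
      rw [List.cons_append]
      exact ih hmem (s ++ [y])

-- elements already in the accumulator are never re-added
theorem pv_foldl_add_filter {x : String} (ys : List String) (s : List String)
    (hs : s.contains x = true) :
    ys.foldl PySem.Set.add s = (ys.filter (fun y => y != x)).foldl PySem.Set.add s := by
  induction ys generalizing s with
  | nil => rfl
  | cons y t ih =>
    by_cases hyx : y = x
    · subst hyx
      simp only [List.filter_cons, bne_self_eq_false, Bool.false_eq_true, if_false,
        List.foldl_cons, PySem.Set.add, PySem.Set.contains, hs, if_true]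
      exact ih s hs
    · have hkeep : (y != x) = true := by simp [bne_iff_ne, hyx]
      simp only [List.filter_cons, hkeep, if_true, List.foldl_cons]
      apply ih
      unfold PySem.Set.add
      split
      · exact hs
      · simp only [List.contains_eq_mem, decide_eq_true_eq] at hs ⊢
        exact List.mem_append_left _ hs

-- first-appearance dedup peels its head
theorem pv_ofList_cons (x : String) (xs : List String) :
    PySem.Set.ofList (x :: xs) = x :: PySem.Set.ofList (xs.filter (fun y => y != x)) := by
  have h1 : PySem.Set.ofList (x :: xs) = xs.foldl PySem.Set.add [x] := rfl
  rw [h1, pv_foldl_add_filter (x := x) xs [x] (by simp),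
      pv_foldl_add_cons (x := x) (by simp [List.mem_filter]) []]
  rfl

-- filtering away another SSID's group does not change c's group
theorem pv_filter_rest (l : List (List (String × String))) (s0 c : String) (hc : c ≠ s0) :
    (l.filter (fun n => pvSsid n != s0)).filter (fun n => pvSsid n == c)
      = l.filter (fun n => pvSsid n == c) := by
  rw [List.filter_filter]
  apply List.filter_congr
  intro n _
  by_cases h : pvSsid n = c
  · simp [h, hc]
  · simp [h]

theorem pv_tagGroup_rest (l : List (List (String × String))) (s0 c : String) (hc : c ≠ s0) :
    pvTagGroup (l.filter (fun n => pvSsid n != s0)) c = pvTagGroup l c := by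
  unfold pvTagGroup
  rw [pv_filter_rest l s0 c hc]

-- congruence for flatMap over the members of a list
theorem pv_flatMap_congr {α β : Type} {l : List α} {f g : α → List β}
    (h : ∀ x ∈ l, f x = g x) : l.flatMap f = l.flatMap g := by
  induction l with
  | nil => rfl
  | cons x t ih =>
    rw [List.flatMap_cons, List.flatMap_cons, h x List.mem_cons_self,
      ih (fun y hy => h y (List.mem_cons_of_mem _ hy))]

-- B's loop equals the same flatMap characterisation (strong induction on the list length).
theorem pv_B_eq_aux (n : Nat) :
    ∀ (rem acc : List (List (String × String))), rem.length ≤ n →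
      pvPeel rem acc = acc ++ (PySem.Set.ofList (rem.map pvSsid)).flatMap (pvTagGroup rem) := by
  induction n with
  | zero =>
    intro rem acc hlen
    have : rem = [] := List.eq_nil_of_length_eq_zero (Nat.le_zero.mp hlen)
    subst this
    simp [pvPeel]
  | succ n ih =>
    intro rem acc hlen
    match rem with
    | [] => simp [pvPeel]
    | net :: t =>
      have hrem' : (net :: t).filter (fun m => pvSsid m != pvSsid net)
          = t.filter (fun m => pvSsid m != pvSsid net) := by
        simp
      have hlen' : ((net :: t).filter (fun m => pvSsid m != pvSsid net)).length ≤ n := by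
        rw [hrem']
        exact Nat.le_trans (List.length_filter_le _ _)
          (Nat.le_of_succ_le_succ (by simpa using hlen))
      have hmap : (((net :: t).filter (fun m => pvSsid m != pvSsid net)).map pvSsid)
          = ((net :: t).map pvSsid).filter (fun y => y != pvSsid net) := by
        rw [List.filter_map]; rfl
      have hkeys : PySem.Set.ofList ((net :: t).map pvSsid)
          = pvSsid net ::
            PySem.Set.ofList ((((net :: t).filter (fun m => pvSsid m != pvSsid net)).map pvSsid)) := by
        rw [hmap, List.map_cons, pv_ofList_cons]
        congr 1
        rw [List.filter_cons]
        simp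
      have htail : (PySem.Set.ofList (((net :: t).filter (fun m => pvSsid m != pvSsid net)).map pvSsid)).flatMap
            (pvTagGroup ((net :: t).filter (fun m => pvSsid m != pvSsid net)))
          = (PySem.Set.ofList (((net :: t).filter (fun m => pvSsid m != pvSsid net)).map pvSsid)).flatMap
            (pvTagGroup (net :: t)) := by
        apply pv_flatMap_congr
        intro c hc
        rw [PySem.Set.mem_ofList, List.mem_map] at hc
        obtain ⟨m, hm, rfl⟩ := hc
        have hne := List.of_mem_filter hm
        exact pv_tagGroup_rest _ _ _ (by simpa [bne_iff_ne] using hne)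
      calc pvPeel (net :: t) acc
          = pvPeel ((net :: t).filter (fun m => pvSsid m != pvSsid net))
              (((net :: t).filter (fun m => pvSsid m == pvSsid net)).foldl
                (fun r item => r ++ [pvSetStatus item
                  (if ((net :: t).filter (fun m => pvSsid m == pvSsid net)).length > 1
                   then "⚠ Suspicious" else "Safe")]) acc) := by rw [pvPeel]
        _ = (((net :: t).filter (fun m => pvSsid m == pvSsid net)).foldl
                (fun r item => r ++ [pvSetStatus item
                  (if ((net :: t).filter (fun m => pvSsid m == pvSsid net)).length > 1
                   then "⚠ Suspicious" else "Safe")]) acc)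
            ++ (PySem.Set.ofList (((net :: t).filter (fun m => pvSsid m != pvSsid net)).map pvSsid)).flatMap
                (pvTagGroup ((net :: t).filter (fun m => pvSsid m != pvSsid net))) :=
          ih _ _ hlen'
        _ = acc ++ pvTagGroup (net :: t) (pvSsid net)
            ++ (PySem.Set.ofList (((net :: t).filter (fun m => pvSsid m != pvSsid net)).map pvSsid)).flatMap
                (pvTagGroup (net :: t)) := by
          rw [PySem.List.foldl_append_singleton_eq_map, htail, pvTagGroup]
        _ = acc ++ (PySem.Set.ofList ((net :: t).map pvSsid)).flatMap (pvTagGroup (net :: t)) := by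
          rw [hkeys, List.flatMap_cons, List.append_assoc]

theorem pv_B_eq (l : List (List (String × String))) :
    analyze_networks_alt l = (PySem.Set.ofList (l.map pvSsid)).flatMap (pvTagGroup l) := by
  unfold analyze_networks_alt
  rw [pv_B_eq_aux l.length l [] (Nat.le_refl _), List.nil_append]

-- ===== VERDICT (by name: the statement is the Claim_ definition above) =====
theorem analyze_networks_spec : Claim_equal_analyze_networks := by
  intro networks _ _
  unfold Spec_analyze_networks
  rw [pv_A_eq, pv_B_eq]
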